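-- pv_equiv track=rewrite | github.com/rbflakt/BackJoon_python | 백준/Gold/17297. Messi Gimossi/Messi Gimossi.py | messi_fibonacci
-- ===== SOURCE A (Python) =====
-- def messi_fibonacci(m):
--     base1 = "Messi"
--     base2 = "Messi Gimossi"
--
--     dp_length = {1: len(base1), 2: len(base2)}
--
--     for i in range(3, 50):
--         dp_length[i] = dp_length[i - 1] + 1 + dp_length[i - 2]
--
--     n = 50
--     while n > 2:
--         left_length = dp_length[n - 1]
--
--         if m == 6:
--           return "Messi Messi Gimossi"
--         if m <= left_length:
--             n -= 1  # 왼쪽 서브트리로 이동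
--         elif m == left_length + 1:
--             return "Messi Messi Gimossi"  # 공백 반환
--         else:
--             m -= left_length + 1  # 오른쪽 서브트리로 이동
--             n -= 2
--     if n == 1:
--         return base1[m - 1]
--     return base2[m - 1]
-- ===== SOURCE B (Python) =====
-- def messi_fibonacci(m):
--     # Recursive descent over the Fibonacci-string tree T(n) = T(n-1) + " " + T(n-2),
--     # lengths built once as a list instead of A's dict.
--     lengths = [0, 5, 13]
--     while len(lengths) < 50:
--         lengths.append(lengths[-1] + 1 + lengths[-2])
--
--     def f(n, m):
--         if n == 1:
--             return "Messi"[m - 1]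
--         if n == 2:
--             return "Messi Gimossi"[m - 1]
--         if m == 6:
--             return "Messi Messi Gimossi"
--         left = lengths[n - 1]
--         if m <= left:
--             return f(n - 1, m)
--         if m == left + 1:
--             return "Messi Messi Gimossi"
--         return f(n - 2, m - left - 1)
--
--     return f(50, m)
-- ===== Notes on version B (the rewrite author's own statement) =====
-- stated objective: alternative
-- what changed: Replaces A's explicit n=50 descent while-loop over a dict length table with a recursive helper f(n, m) over the Fibonacci-string tree, with the lengths built once as a list.
-- outside the precondition, e.g. on messi_fibonacci(-13): A raises IndexError, B raises IndexError
import Mathlib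
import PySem

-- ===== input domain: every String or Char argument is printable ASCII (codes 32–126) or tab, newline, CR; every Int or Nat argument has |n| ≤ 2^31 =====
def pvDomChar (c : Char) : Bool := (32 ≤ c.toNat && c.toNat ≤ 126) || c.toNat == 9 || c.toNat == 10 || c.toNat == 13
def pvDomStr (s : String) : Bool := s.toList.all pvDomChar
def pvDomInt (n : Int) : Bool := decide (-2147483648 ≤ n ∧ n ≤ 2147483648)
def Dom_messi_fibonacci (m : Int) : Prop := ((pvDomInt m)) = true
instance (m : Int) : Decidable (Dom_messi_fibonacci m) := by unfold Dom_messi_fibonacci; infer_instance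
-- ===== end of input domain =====

-- B replaces A's explicit n=50 descent loop over a dict length table by a recursive
-- descent helper over the Fibonacci-string tree with the lengths built once as a list
-- (objective: alternative decomposition; same behaviour, return value only).

-- ===== PORT A =====
-- dp_length: dict {1:5, 2:13} extended by the for-loop over range(3, 50)
def messiDP : PySem.Dict Int Int :=
  (PySem.List.pyRange 3 50 1).foldl
    (fun d i => d.insert i (d.getD (i - 1) 0 + 1 + d.getD (i - 2) 0))
    (((PySem.Dict.empty).insert 1 (PySem.Str.len "Messi")).insert 2 (PySem.Str.len "Messi Gimossi"))

-- the 'while n > 2' loop followed by the two base returns; n is the Python loop variable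
-- (always 1..50).  base[m-1] = Str.pyGet?; none = IndexError, excluded by Pre_ (returns "").
def messiLoopA (dp : PySem.Dict Int Int) : Nat → Int → String
  | n, m =>
    if h : 2 < n then
      let left := dp.getD ((n : Int) - 1) 0
      if m = 6 then "Messi Messi Gimossi"
      else if m ≤ left then messiLoopA dp (n - 1) m
      else if m = left + 1 then "Messi Messi Gimossi"
      else messiLoopA dp (n - 2) (m - left - 1)
    else if n = 1 then
      match PySem.Str.pyGet? "Messi" (m - 1) with
      | some c => String.ofList [c]
      | none => ""
    else
      match PySem.Str.pyGet? "Messi Gimossi" (m - 1) with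
      | some c => String.ofList [c]
      | none => ""
  termination_by n _ => n
  decreasing_by all_goals omega

def messi_fibonacci (m : Int) : String := messiLoopA messiDP 50 m

-- ===== PORT B =====
-- 'while len(lengths) < 50: lengths.append(...)' (fuel 50 suffices: list grows by 1 each step)
def altBuild : Nat → List Int → List Int
  | 0, acc => acc
  | fuel + 1, acc =>
    if acc.length < 50 then
      altBuild fuel (acc ++ [PySem.List.pyGetD acc (-1) 0 + 1 + PySem.List.pyGetD acc (-2) 0])
    else acc

def altLengths : List Int := altBuild 50 [0, 5, 13]

-- recursive descent f(n, m); n = 0 is a totality guard never reached from the entry n = 50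
def altF (lengths : List Int) : Nat → Int → String
  | 0, _ => ""
  | 1, m =>
    (match PySem.Str.pyGet? "Messi" (m - 1) with
     | some c => String.ofList [c]
     | none => "")
  | 2, m =>
    (match PySem.Str.pyGet? "Messi Gimossi" (m - 1) with
     | some c => String.ofList [c]
     | none => "")
  | n + 3, m =>
    if m = 6 then "Messi Messi Gimossi"
    else
      let left := PySem.List.pyGetD lengths ((n : Int) + 2) 0
      if m ≤ left then altF lengths (n + 2) m
      else if m = left + 1 then "Messi Messi Gimossi"
      else altF lengths (n + 1) (m - left - 1)

def messi_fibonacci_alt (m : Int) : String := altF altLengths 50 m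

-- ===== PRECONDITION & SPEC =====
-- Pre_ excludes exactly the inputs m ≤ -13 on which Python A raises IndexError
-- (negative index past the start of the base string); A returns normally for every m ≥ -12 in Dom.
def Pre_messi_fibonacci (m : Int) : Prop := -12 ≤ m
instance (m : Int) : Decidable (Pre_messi_fibonacci m) := by unfold Pre_messi_fibonacci; infer_instance
def pvWitness_messi_fibonacci : Int := (7)

def Spec_messi_fibonacci (m : Int) (out : String) : Prop := out = messi_fibonacci_alt m
instance (m : Int) (out : String) : Decidable (Spec_messi_fibonacci m out) := by unfold Spec_messi_fibonacci; infer_instance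

-- ===== CLAIM (what is proved, stated in full; the proofs are below) =====
def Claim_equal_messi_fibonacci : Prop := ∀ (m : Int), Dom_messi_fibonacci m → Pre_messi_fibonacci m → Spec_messi_fibonacci m (messi_fibonacci m)

-- ===== LEMMAS AND PROOFS =====

-- the dict lookups A makes agree with the list lookups B makes, on every key used
set_option maxRecDepth 10000 in
lemma left_agree : ∀ k < 50, PySem.Dict.getD messiDP ((k : Nat) : Int) 0
    = PySem.List.pyGetD altLengths ((k : Nat) : Int) 0 := by decide

set_option maxRecDepth 10000 in
lemma loop_eq : ∀ n : Nat, 1 ≤ n → n ≤ 50 → ∀ m : Int,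
    messiLoopA messiDP n m = altF altLengths n m := by
  intro n
  induction n using Nat.strong_induction_on with
  | _ n IH =>
    intro h1 h50 m
    match n, h1 with
    | 1, _ => rw [messiLoopA]; rfl
    | 2, _ => rw [messiLoopA]; rfl
    | (k + 3), _ =>
      rw [messiLoopA, altF]
      have hk : ((k + 3 : Nat) : Int) - 1 = (k : Int) + 2 := by push_cast; ring
      have hL : PySem.Dict.getD messiDP ((k : Int) + 2) 0
          = PySem.List.pyGetD altLengths ((k : Int) + 2) 0 := by
        have h := left_agree (k + 2) (by omega)
        have hcast : ((k + 2 : Nat) : Int) = (k : Int) + 2 := by push_cast; ring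
        rwa [hcast] at h
      simp only [show (2 : Nat) < k + 3 by omega, dif_pos, hk, hL,
        show k + 3 - 1 = k + 2 from rfl, show k + 3 - 2 = k + 1 from rfl]
      split_ifs with h6 hle heq
      · rfl
      · exact IH (k + 2) (by omega) (by omega) (by omega) m
      · rfl
      · exact IH (k + 1) (by omega) (by omega) (by omega) _

-- ===== VERDICT (by name: the statement is the Claim_ definition above) =====
theorem messi_fibonacci_spec : Claim_equal_messi_fibonacci := by
  intro m _ _
  show messi_fibonacci m = messi_fibonacci_alt m
  exact loop_eq 50 (by omega) (by omega) m
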